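-- pv_equiv track=rewrite | github.com/denisschmidt/leetcode | leetcode/greedy/1737. Change Minimum Characters to Satisfy One of Three Conditions/py/main.py | minCharacters
-- ===== SOURCE A (Python) =====
-- def minCharacters(a: str, b: str) -> int:
--     # Time O(A + B)
--     # Space O(1)
--     def getReplaceCount(a, b):
--         res = float('inf')
--
--         for i in range(25):
--             current_char = chr(i + 97)
--
--             replace_cnt = 0
--
--             for i in range(len(a)):
--                 if a[i] > current_char:
--                     replace_cnt += 1
--
--             for i in range(len(b)):
--                 if b[i] <= current_char:
--                     replace_cnt += 1
--
--             res = min(res, replace_cnt)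
--
--         return res
--
--     count = {}
--     max_freq = 0
--     for ch in a:
--         count[ch] = count.get(ch, 0) + 1
--
--     for ch in b:
--         count[ch] = count.get(ch, 0) + 1
--         max_freq = max(max_freq, count[ch])
--
--     # 3 condition
--     total_chars = len(a) + len(b)
--
--     return min(total_chars - max_freq, getReplaceCount(a, b),
--                getReplaceCount(b, a))
-- ===== SOURCE B (Python) =====
-- def minCharacters(a: str, b: str) -> int:
--     # Histogram + running prefix counts: one pass over each string, then one
--     # pass over the 128 ASCII codes; never rescans the strings per threshold.
--     ca = {}
--     for ch in a:
--         ca[ch] = ca.get(ch, 0) + 1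
--     cb = {}
--     for ch in b:
--         cb[ch] = cb.get(ch, 0) + 1
--     total = len(a) + len(b)
--     best = total - max((ca.get(ch, 0) + cb.get(ch, 0) for ch in set(a + b)), default=0)
--     na = 0  # number of chars of a with code <= t
--     nb = 0  # number of chars of b with code <= t
--     for t in range(122):
--         c = chr(t)
--         na += ca.get(c, 0)
--         nb += cb.get(c, 0)
--         if 97 <= t:
--             # condition "all of a < all of b" at cut chr(t) / the symmetric one
--             best = min(min(best, (len(a) - na) + nb), (len(b) - nb) + na)
--     return best
-- ===== Notes on version B (the rewrite author's own statement) =====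
-- stated objective: faster
-- what changed: B builds per-string character histograms once and sweeps the 128 ASCII codes with running prefix counts, instead of A's rescanning both full strings for each of the 25 thresholds; B also uses the true global max frequency (A maximizes only over characters occurring in b, which provably never changes the final min).
import Mathlib
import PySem

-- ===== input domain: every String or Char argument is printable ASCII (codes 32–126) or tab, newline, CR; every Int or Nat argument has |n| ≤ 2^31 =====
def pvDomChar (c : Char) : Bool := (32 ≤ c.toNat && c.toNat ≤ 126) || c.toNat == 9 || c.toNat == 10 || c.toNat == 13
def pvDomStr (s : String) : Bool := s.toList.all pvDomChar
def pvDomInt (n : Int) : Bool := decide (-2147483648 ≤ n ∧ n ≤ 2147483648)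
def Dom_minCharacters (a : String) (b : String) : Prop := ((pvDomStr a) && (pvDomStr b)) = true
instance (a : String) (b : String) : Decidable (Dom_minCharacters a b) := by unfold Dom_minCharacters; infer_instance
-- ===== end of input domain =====

-- B replaces A's 25 rescans of both strings by one histogram pass per string plus a
-- single prefix-count sweep over the ASCII codes (and uses the true global max
-- frequency, which provably gives the same final minimum as A's b-only max).


-- ===== PORT A =====
-- getReplaceCount: Python's 'res = float('inf')' is modelled as `none`; the
-- 25-iteration loop always replaces it, so the final `.getD 0` never returns the default.
def pvA_grc (a : List Char) (b : List Char) : Int :=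
  ((PySem.List.pyRange 0 25 1).foldl (fun (res : Option Int) i =>
      let current_char : Char := Char.ofNat (i.toNat + 97)
      let cnt1 : Int := a.foldl (fun c ch => if current_char < ch then c + 1 else c) 0
      let cnt2 : Int := b.foldl (fun c ch => if ch ≤ current_char then c + 1 else c) cnt1
      some (match res with | none => cnt2 | some v => min v cnt2)) none).getD 0

def pvA_main (al : List Char) (bl : List Char) : Int :=
  let count := al.foldl (fun (d : PySem.Dict Char Int) ch => d.insert ch (d.getD ch 0 + 1))
      PySem.Dict.empty
  let st := bl.foldl (fun (p : PySem.Dict Char Int × Int) ch =>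
      let d := p.1.insert ch (p.1.getD ch 0 + 1)
      (d, max p.2 (d.getD ch 0))) (count, 0)
  let total_chars : Int := (al.length : Int) + (bl.length : Int)
  min (total_chars - st.2) (min (pvA_grc al bl) (pvA_grc bl al))

def minCharacters (a : String) (b : String) : Int := pvA_main a.toList b.toList

-- ===== PORT B =====
def pvB_main (al : List Char) (bl : List Char) : Int :=
  let ca := al.foldl (fun (d : PySem.Dict Char Int) ch => d.insert ch (d.getD ch 0 + 1))
      PySem.Dict.empty
  let cb := bl.foldl (fun (d : PySem.Dict Char Int) ch => d.insert ch (d.getD ch 0 + 1))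
      PySem.Dict.empty
  let total : Int := (al.length : Int) + (bl.length : Int)
  let best := total - PySem.List.maxD
      ((PySem.Set.ofList (al ++ bl)).map (fun ch => ca.getD ch 0 + cb.getD ch 0)) (fun x => x) 0
  let st := (PySem.List.pyRange 0 122 1).foldl (fun (s : Int × Int × Int) t =>
      let c := Char.ofNat t.toNat
      let na := s.2.1 + ca.getD c 0
      let nb := s.2.2 + cb.getD c 0
      (if 97 ≤ t then
          min (min s.1 (((al.length : Int) - na) + nb)) (((bl.length : Int) - nb) + na)
        else s.1, na, nb)) (best, 0, 0)
  st.1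

def minCharacters_alt (a : String) (b : String) : Int := pvB_main a.toList b.toList

-- ===== PRECONDITION & SPEC =====
def Spec_minCharacters (a : String) (b : String) (out : Int) : Prop := out = minCharacters_alt a b
instance (a : String) (b : String) (out : Int) : Decidable (Spec_minCharacters a b out) := by unfold Spec_minCharacters; infer_instance

-- ===== CLAIM (what is proved, stated in full; the proofs are below) =====
def Claim_equal_minCharacters : Prop := ∀ (a : String) (b : String), Dom_minCharacters a b → Spec_minCharacters a b (minCharacters a b)

-- ===== LEMMAS AND PROOFS =====

-- number of characters of s whose code is < u
def pvCntLt (s : List Char) (u : Nat) : Int := (s.countP (fun ch => decide (ch.toNat < u)) : Int)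

-- cost of the ordering condition "every char of x < every char of y" at cut code t
def pvHab (x : List Char) (y : List Char) (t : Nat) : Int :=
  ((x.length : Int) - pvCntLt x (t + 1)) + pvCntLt y (t + 1)

theorem pvChar_lt_iff (c d : Char) : c < d ↔ c.toNat < d.toNat := by
  show c.val < d.val ↔ c.val.toNat < d.val.toNat
  exact UInt32.lt_iff_toNat_lt

theorem pvChar_le_iff (c d : Char) : c ≤ d ↔ c.toNat ≤ d.toNat := by
  show c.val ≤ d.val ↔ c.val.toNat ≤ d.val.toNat
  exact UInt32.le_iff_toNat_le

theorem pvChar_toNat_ofNat (u : Nat) (h : u < 122) : (Char.ofNat u).toNat = u := by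
  rw [Char.toNat_ofNat, if_pos]; exact Or.inl (by omega)

theorem pvChar_eq_iff (u : Nat) (h : u < 122) (ch : Char) : ch = Char.ofNat u ↔ ch.toNat = u := by
  constructor
  · rintro rfl; exact pvChar_toNat_ofNat u h
  · intro h2; rw [← h2, Char.ofNat_toNat]

theorem pvCntLt_nonneg (s : List Char) (u : Nat) : 0 ≤ pvCntLt s u := Int.natCast_nonneg _

theorem pvCntLt_le_len (s : List Char) (u : Nat) : pvCntLt s u ≤ (s.length : Int) := by
  unfold pvCntLt; exact_mod_cast List.countP_le_length

theorem pvCntLt_zero (s : List Char) : pvCntLt s 0 = 0 := by simp [pvCntLt]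

theorem pvCntLt_succ (s : List Char) (u : Nat) (h : u < 122) :
    pvCntLt s (u + 1) = pvCntLt s u + (s.count (Char.ofNat u) : Int) := by
  unfold pvCntLt
  have key : s.countP (fun ch => decide (ch.toNat < u + 1))
      = s.countP (fun ch => decide (ch.toNat < u)) + s.count (Char.ofNat u) := by
    induction s with
    | nil => simp
    | cons ch tl ih =>
      have hbeq : (ch == Char.ofNat u) = decide (ch.toNat = u) := by
        by_cases hx : ch.toNat = u
        · rw [(pvChar_eq_iff u h ch).2 hx]; simp [pvChar_toNat_ofNat u h]
        · have hne : ch ≠ Char.ofNat u := fun hc => hx ((pvChar_eq_iff u h ch).1 hc)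
          simp [hne, hx]
      simp only [List.countP_cons, List.count_cons, hbeq, ih, decide_eq_true_eq]
      split_ifs <;> omega
  push_cast [key]; ring

theorem pvCount_le_cntLt (s : List Char) (x : Char) (u : Nat) (h : x.toNat < u) :
    (s.count x : Int) ≤ pvCntLt s u := by
  unfold pvCntLt
  have : s.count x ≤ s.countP (fun ch => decide (ch.toNat < u)) := by
    rw [List.count_eq_countP]
    exact List.countP_mono_left (by intro a _ ha; simp only [beq_iff_eq] at ha; subst ha; simpa)
  exact_mod_cast this

theorem pvCntLt_add_count_le (s : List Char) (x : Char) (u : Nat) (h : ¬ x.toNat < u) :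
    pvCntLt s u + (s.count x : Int) ≤ (s.length : Int) := by
  unfold pvCntLt
  have h2 : s.count x ≤ s.countP (fun ch => !decide (ch.toNat < u)) := by
    rw [List.count_eq_countP]
    refine List.countP_mono_left ?_
    intro a _ ha
    simp only [beq_iff_eq] at ha; subst ha
    simp only [Bool.not_eq_true', decide_eq_false_iff_not]; omega
  have h3 : s.countP (fun ch => decide (ch.toNat < u)) + s.countP (fun ch => !decide (ch.toNat < u)) = s.length := by
    rw [List.length_eq_countP_add_countP (fun ch : Char => decide (ch.toNat < u))]
    congr 1
    apply List.countP_congr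
    intro a _
    simp
  omega

-- A's inner counting loops
theorem pvA_fold_gt (x : List Char) (cc : Char) :
    x.foldl (fun c ch => if cc < ch then c + 1 else c) 0
      = (x.length : Int) - pvCntLt x (cc.toNat + 1) := by
  rw [PySem.List.foldl_ite_add_one (fun ch => cc < ch)]
  have key : x.countP (fun ch => decide (cc < ch)) + x.countP (fun ch => decide (ch.toNat < cc.toNat + 1)) = x.length := by
    rw [List.length_eq_countP_add_countP (fun ch : Char => decide (cc < ch))]
    congr 1
    apply List.countP_congr
    intro a _
    simp only [decide_eq_true_eq, pvChar_lt_iff]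
    omega
  unfold pvCntLt
  omega

theorem pvA_fold_le (y : List Char) (cc : Char) (c0 : Int) :
    y.foldl (fun c ch => if ch ≤ cc then c + 1 else c) c0 = c0 + pvCntLt y (cc.toNat + 1) := by
  rw [PySem.List.foldl_ite_add_one (fun ch => ch ≤ cc)]
  unfold pvCntLt
  congr 2
  apply List.countP_congr
  intro a _
  simp only [decide_eq_true_eq, pvChar_le_iff]
  omega

-- the running 'res = min(res, v)' loop started at float('inf')
theorem pvOptMin_fold (g : Int → Int) (xs : List Int) (v : Int) :
    xs.foldl (fun (res : Option Int) i =>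
        some (match res with | none => g i | some w => min w (g i))) (some v)
      = some ((xs.map g).foldl min v) := by
  induction xs generalizing v with
  | nil => simp
  | cons x tl ih => simp [ih]

-- characterisation of getReplaceCount
theorem pvA_grc_spec (x y : List Char) :
    (∀ t : Nat, 97 ≤ t → t < 122 → pvA_grc x y ≤ pvHab x y t) ∧
    (∃ t : Nat, 97 ≤ t ∧ t < 122 ∧ pvA_grc x y = pvHab x y t) := by
  have hbody : pvA_grc x y
      = ((PySem.List.pyRange 0 25 1).foldl (fun (res : Option Int) i =>
          some (match res with
            | none => pvHab x y (i.toNat + 97)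
            | some w => min w (pvHab x y (i.toNat + 97)))) none).getD 0 := by
    unfold pvA_grc
    congr 1
    apply PySem.List.foldl_congr_mem
    intro acc i hi
    obtain ⟨hi0, hi25⟩ := PySem.List.mem_pyRange_one.1 hi
    have hc : (Char.ofNat (i.toNat + 97)).toNat = i.toNat + 97 :=
      pvChar_toNat_ofNat _ (by omega)
    show some _ = some _
    rw [pvA_fold_gt, pvA_fold_le, hc]
    rfl
  have hrange : PySem.List.pyRange 0 25 1 = 0 :: PySem.List.pyRange 1 25 1 := by
    have := PySem.List.pyRange_one_cons (a := 0) (b := 25) (by norm_num)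
    simpa using this
  rw [hbody, hrange]
  simp only [List.foldl_cons]
  rw [pvOptMin_fold]
  simp only [Option.getD_some]
  set g : Int → Int := fun i => pvHab x y (i.toNat + 97) with hg
  have h1 := PySem.List.foldl_min_le ((PySem.List.pyRange 1 25 1).map g) (g 0)
  have h2 := PySem.List.foldl_min_mem ((PySem.List.pyRange 1 25 1).map g) (g 0)
  constructor
  · intro t ht97 ht122
    by_cases h97 : t = 97
    · subst h97
      have : g 0 = pvHab x y 97 := by simp [hg]
      exact this ▸ h1.1
    · have hmem : ((t : Int) - 97) ∈ PySem.List.pyRange 1 25 1 :=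
        PySem.List.mem_pyRange_one.2 (by omega)
      have : g ((t : Int) - 97) = pvHab x y t := by
        simp only [hg]
        congr 1
        omega
      exact this ▸ h1.2 _ (List.mem_map_of_mem hmem)
  · rcases h2 with h2 | h2
    · refine ⟨97, by omega, by omega, ?_⟩
      rw [h2]; simp [hg]
    · obtain ⟨i, hi, hgi⟩ := List.mem_map.1 h2
      obtain ⟨hi1, hi25⟩ := PySem.List.mem_pyRange_one.1 hi
      refine ⟨i.toNat + 97, by omega, by omega, ?_⟩
      rw [← hgi]

-- characterisation of A's max_freq loop over b
theorem pvA_maxfold (l : List Char) (d : PySem.Dict Char Int) (m : Int) :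
    m ≤ (l.foldl (fun (p : PySem.Dict Char Int × Int) ch =>
        (p.1.insert ch (p.1.getD ch 0 + 1), max p.2 ((p.1.insert ch (p.1.getD ch 0 + 1)).getD ch 0))) (d, m)).2 ∧
    (∀ ch ∈ l, d.getD ch 0 + (l.count ch : Int) ≤ (l.foldl (fun (p : PySem.Dict Char Int × Int) ch =>
        (p.1.insert ch (p.1.getD ch 0 + 1), max p.2 ((p.1.insert ch (p.1.getD ch 0 + 1)).getD ch 0))) (d, m)).2) ∧
    ((l.foldl (fun (p : PySem.Dict Char Int × Int) ch =>
        (p.1.insert ch (p.1.getD ch 0 + 1), max p.2 ((p.1.insert ch (p.1.getD ch 0 + 1)).getD ch 0))) (d, m)).2 = m ∨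
      ∃ ch ∈ l, (l.foldl (fun (p : PySem.Dict Char Int × Int) ch =>
        (p.1.insert ch (p.1.getD ch 0 + 1), max p.2 ((p.1.insert ch (p.1.getD ch 0 + 1)).getD ch 0))) (d, m)).2 = d.getD ch 0 + (l.count ch : Int)) := by
  induction l generalizing d m with
  | nil => simp
  | cons c rest ih =>
    simp only [List.foldl_cons]
    have hself : (d.insert c (d.getD c 0 + 1)).getD c 0 = d.getD c 0 + 1 := by
      rw [PySem.Dict.getD_insert]; simp
    have hgd : ∀ ch : Char, (d.insert c (d.getD c 0 + 1)).getD ch 0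
        = d.getD ch 0 + (if ch = c then 1 else 0) := by
      intro ch
      rw [PySem.Dict.getD_insert]
      split_ifs with hc
      · subst hc; ring
      · ring
    obtain ⟨ih1, ih2, ih3⟩ := ih (d.insert c (d.getD c 0 + 1)) (max m ((d.insert c (d.getD c 0 + 1)).getD c 0))
    rw [hself] at ih1 ih2 ih3 ⊢
    have hmL := le_max_left m (d.getD c 0 + 1)
    have hmR := le_max_right m (d.getD c 0 + 1)
    refine ⟨le_trans hmL ih1, ?_, ?_⟩
    · intro ch hch
      rcases List.mem_cons.1 hch with rfl | hch'
      · by_cases hcr : ch ∈ rest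
        · have hle := ih2 ch hcr
          rw [hgd ch, if_pos rfl] at hle
          rw [List.count_cons_self]
          push_cast
          omega
        · have hcnt : rest.count ch = 0 := List.count_eq_zero.2 hcr
          rw [List.count_cons_self, hcnt]
          push_cast
          omega
      · have hle := ih2 ch hch'
        rw [hgd ch] at hle
        rw [List.count_cons]
        by_cases hc : ch = c
        · rw [if_pos hc] at hle
          have hbe : (c == ch) = true := beq_iff_eq.2 hc.symm
          simp only [hbe, if_true]
          push_cast
          omega
        · have hbe : (c == ch) = false := beq_eq_false_iff_ne.2 (fun h2 => hc h2.symm)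
          simp only [if_neg hc] at hle
          simp only [hbe]
          push_cast
          omega
    · rcases ih3 with h | ⟨ch, hch, hval⟩
      · rcases le_or_gt ((d.getD c 0) + 1) m with hm | hm
        · left
          rw [h, max_eq_left hm]
        · right
          refine ⟨c, List.mem_cons_self .., ?_⟩
          by_cases hcr : c ∈ rest
          · exfalso
            have h2 := ih2 c hcr
            rw [hgd c, if_pos rfl] at h2
            have hpos : 0 < rest.count c := List.count_pos_iff.2 hcr
            have hmax : max m (d.getD c 0 + 1) = d.getD c 0 + 1 := max_eq_right hm.le
            omega
          · have hcnt : rest.count c = 0 := List.count_eq_zero.2 hcr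
            rw [List.count_cons_self, hcnt, h, max_eq_right hm.le]
            push_cast
            omega
      · right
        refine ⟨ch, List.mem_cons_of_mem _ hch, ?_⟩
        rw [hval, hgd ch, List.count_cons]
        by_cases hc : ch = c
        · subst hc
          simp only [beq_self_eq_true, if_true]
          push_cast
          ring
        · have hbe : (c == ch) = false := beq_eq_false_iff_ne.2 (fun h2 => hc h2.symm)
          simp only [if_neg hc, hbe]
          push_cast
          ring

-- characterisation of B's default-0 max over the distinct characters
theorem pvB_maxD (al bl : List Char) :
    0 ≤ PySem.List.maxD ((PySem.Set.ofList (al ++ bl)).map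
        (fun ch => (al.count ch : Int) + (bl.count ch : Int))) (fun x => x) 0 ∧
    (∀ ch ∈ al ++ bl, (al.count ch : Int) + (bl.count ch : Int)
        ≤ PySem.List.maxD ((PySem.Set.ofList (al ++ bl)).map
            (fun ch => (al.count ch : Int) + (bl.count ch : Int))) (fun x => x) 0) ∧
    (PySem.List.maxD ((PySem.Set.ofList (al ++ bl)).map
        (fun ch => (al.count ch : Int) + (bl.count ch : Int))) (fun x => x) 0 = 0 ∨
      ∃ ch ∈ al ++ bl, PySem.List.maxD ((PySem.Set.ofList (al ++ bl)).map
        (fun ch => (al.count ch : Int) + (bl.count ch : Int))) (fun x => x) 0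
          = (al.count ch : Int) + (bl.count ch : Int)) := by
  unfold PySem.List.maxD
  rcases hm : PySem.List.max? ((PySem.Set.ofList (al ++ bl)).map
      (fun ch => (al.count ch : Int) + (bl.count ch : Int))) (fun x => x) with _ | m
  · have hnil := (PySem.List.max?_eq_none_iff _ _).1 hm
    have hset : PySem.Set.ofList (al ++ bl) = [] := by
      by_contra hne
      rcases List.exists_mem_of_ne_nil _ hne with ⟨z, hz⟩
      have : ((al.count z : Int) + (bl.count z : Int)) ∈
          (PySem.Set.ofList (al ++ bl)).map (fun ch => (al.count ch : Int) + (bl.count ch : Int)) :=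
        List.mem_map_of_mem hz
      rw [hnil] at this
      exact absurd this (List.not_mem_nil)
    refine ⟨le_refl _, ?_, Or.inl rfl⟩
    intro ch hch
    have : ch ∈ PySem.Set.ofList (al ++ bl) := (PySem.Set.mem_ofList _ _).2 hch
    rw [hset] at this
    exact absurd this (List.not_mem_nil)
  · obtain ⟨z, hz, hzm⟩ := List.mem_map.1 (PySem.List.max?_mem hm)
    refine ⟨?_, ?_, ?_⟩
    · simp only [Option.getD_some]
      rw [← hzm]
      positivity
    · intro ch hch
      have hmem : ((al.count ch : Int) + (bl.count ch : Int)) ∈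
          (PySem.Set.ofList (al ++ bl)).map (fun ch => (al.count ch : Int) + (bl.count ch : Int)) :=
        List.mem_map_of_mem ((PySem.Set.mem_ofList _ _).2 hch)
      simpa using PySem.List.max?_isMax hm _ hmem
    · right
      exact ⟨z, (PySem.Set.mem_ofList _ _).1 hz, by simp [← hzm]⟩

-- B's sweep step over one ASCII code (proof-side name for the loop body of pvB_main)
def pvBstep (al bl : List Char) (s : Int × Int × Int) (t : Int) : Int × Int × Int :=
  let c := Char.ofNat t.toNat
  let na := s.2.1 + (al.count c : Int)
  let nb := s.2.2 + (bl.count c : Int)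
  (if 97 ≤ t then
      min (min s.1 (((al.length : Int) - na) + nb)) (((bl.length : Int) - nb) + na)
    else s.1, na, nb)

-- invariant of B's prefix-count sweep over the codes [u, u+n)
theorem pvB_sweep (al bl : List Char) :
    ∀ (n u : Nat) (B : Int), u + n ≤ 122 →
    (((PySem.List.pyRange (u : Int) ((u : Int) + (n : Int)) 1).foldl
        (pvBstep al bl) (B, pvCntLt al u, pvCntLt bl u)).1 ≤ B ∧
      (∀ t : Nat, 97 ≤ t → u ≤ t → t < u + n →
        ((PySem.List.pyRange (u : Int) ((u : Int) + (n : Int)) 1).foldl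
          (pvBstep al bl) (B, pvCntLt al u, pvCntLt bl u)).1
          ≤ min (pvHab al bl t) (pvHab bl al t)) ∧
      (((PySem.List.pyRange (u : Int) ((u : Int) + (n : Int)) 1).foldl
          (pvBstep al bl) (B, pvCntLt al u, pvCntLt bl u)).1 = B ∨
        ∃ t : Nat, 97 ≤ t ∧ u ≤ t ∧ t < u + n ∧
          (((PySem.List.pyRange (u : Int) ((u : Int) + (n : Int)) 1).foldl
            (pvBstep al bl) (B, pvCntLt al u, pvCntLt bl u)).1 = pvHab al bl t ∨
            ((PySem.List.pyRange (u : Int) ((u : Int) + (n : Int)) 1).foldl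
            (pvBstep al bl) (B, pvCntLt al u, pvCntLt bl u)).1 = pvHab bl al t))) := by
  intro n
  induction n with
  | zero =>
    intro u B h
    have hnil : PySem.List.pyRange (u : Int) ((u : Int) + ((0:Nat) : Int)) 1 = [] := by
      apply List.eq_nil_iff_forall_not_mem.2
      intro z hz
      have := PySem.List.mem_pyRange_one.1 hz
      omega
    rw [hnil, List.foldl_nil]
    refine ⟨le_refl _, ?_, Or.inl rfl⟩
    intro t ht1 ht2 ht3
    omega
  | succ n ih =>
    intro u B h
    have hu122 : u < 122 := by omega
    have hcons : PySem.List.pyRange (u : Int) ((u : Int) + ((n + 1 : Nat) : Int)) 1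
        = (u : Int) :: PySem.List.pyRange (((u + 1 : Nat)) : Int) (((u + 1 : Nat) : Int) + (n : Int)) 1 := by
      have e1 : ((u : Int)) + ((n + 1 : Nat) : Int) = (((u + 1 : Nat)) : Int) + (n : Int) := by
        push_cast; ring
      have e2 : ((u : Int)) + 1 = (((u + 1 : Nat)) : Int) := by push_cast; ring
      rw [e1, PySem.List.pyRange_one_cons (by push_cast; omega), e2]
    rw [hcons, List.foldl_cons]
    have hstep : pvBstep al bl (B, pvCntLt al u, pvCntLt bl u) ((u : Nat) : Int)
        = ((if 97 ≤ u then min (min B (pvHab al bl u)) (pvHab bl al u) else B),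
            pvCntLt al (u + 1), pvCntLt bl (u + 1)) := by
      unfold pvBstep
      by_cases hg : 97 ≤ u
      · simp only [Int.toNat_natCast, if_pos (show (97:Int) ≤ (u : Int) by exact_mod_cast hg),
          if_pos hg, pvHab, pvCntLt_succ al u hu122, pvCntLt_succ bl u hu122]
      · simp only [Int.toNat_natCast, if_neg (show ¬ (97:Int) ≤ (u : Int) by exact_mod_cast hg),
          if_neg hg, pvCntLt_succ al u hu122, pvCntLt_succ bl u hu122]
    rw [hstep]
    obtain ⟨ih1, ih2, ih3⟩ := ih (u + 1)
      (if 97 ≤ u then min (min B (pvHab al bl u)) (pvHab bl al u) else B) (by omega)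
    have hB'B : (if 97 ≤ u then min (min B (pvHab al bl u)) (pvHab bl al u) else B) ≤ B := by
      split_ifs
      · exact le_trans (min_le_left _ _) (min_le_left _ _)
      · exact le_refl _
    refine ⟨le_trans ih1 hB'B, ?_, ?_⟩
    · intro t ht97 htu htn
      by_cases htu' : t = u
      · subst htu'
        have hB'v : (if 97 ≤ t then min (min B (pvHab al bl t)) (pvHab bl al t) else B)
            ≤ min (pvHab al bl t) (pvHab bl al t) := by
          rw [if_pos ht97]
          exact le_min (le_trans (min_le_left _ _) (min_le_right _ _)) (min_le_right _ _)
        exact le_trans ih1 hB'v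
      · exact ih2 t ht97 (by omega) (by omega)
    · rcases ih3 with hr | ⟨t, ht1, ht2, ht3, hval⟩
      · by_cases hg : 97 ≤ u
        · have hB' : (if 97 ≤ u then min (min B (pvHab al bl u)) (pvHab bl al u) else B)
              = min (min B (pvHab al bl u)) (pvHab bl al u) := if_pos hg
          have hr' := hr.trans hB'
          rcases min_cases (min B (pvHab al bl u)) (pvHab bl al u) with ⟨he, _⟩ | ⟨he, _⟩
          · rcases min_cases B (pvHab al bl u) with ⟨he2, _⟩ | ⟨he2, _⟩
            · left; exact (hr'.trans he).trans he2
            · right; exact ⟨u, hg, by omega, by omega, Or.inl ((hr'.trans he).trans he2)⟩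
          · right; exact ⟨u, hg, by omega, by omega, Or.inr (hr'.trans he)⟩
        · have hB' : (if 97 ≤ u then min (min B (pvHab al bl u)) (pvHab bl al u) else B)
              = B := if_neg hg
          left; exact hr.trans hB'
      · right; exact ⟨t, ht1, by omega, by omega, hval⟩

-- if the globally most frequent character occurs only in al, one ordering cost
-- is at most total - (its count)
theorem pvF2 (al bl : List Char) (x : Char) :
    ∃ t : Nat, 97 ≤ t ∧ t < 122 ∧
      (pvHab al bl t ≤ ((al.length : Int) + (bl.length : Int)) - (al.count x : Int) ∨
       pvHab bl al t ≤ ((al.length : Int) + (bl.length : Int)) - (al.count x : Int)) := by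
  by_cases hlo : x.toNat ≤ 97
  · -- every occurrence of x is counted by pvCntLt al 98, so the cost at cut 97 fits
    refine ⟨97, by omega, by omega, Or.inl ?_⟩
    unfold pvHab
    have h1 : (al.count x : Int) ≤ pvCntLt al (97+1) := pvCount_le_cntLt al x (97+1) (by omega)
    have h2 : pvCntLt bl (97+1) ≤ (bl.length : Int) := pvCntLt_le_len bl (97+1)
    have h3 : pvCntLt al (97+1) ≤ (al.length : Int) := pvCntLt_le_len al (97+1)
    omega
  · -- x is strictly above the cut min (x.toNat - 1) 121, so its occurrences are not counted
    refine ⟨min (x.toNat - 1) 121, by omega, by omega, Or.inr ?_⟩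
    unfold pvHab
    have h1 : pvCntLt al (min (x.toNat - 1) 121 + 1) + (al.count x : Int) ≤ (al.length : Int) :=
      pvCntLt_add_count_le al x _ (by omega)
    have h2 : 0 ≤ pvCntLt bl (min (x.toNat - 1) 121 + 1) := pvCntLt_nonneg bl _
    have h3 : pvCntLt bl (min (x.toNat - 1) 121 + 1) ≤ (bl.length : Int) := pvCntLt_le_len bl _
    omega

set_option maxRecDepth 8192 in
theorem pvMain_eq (al bl : List Char) : pvA_main al bl = pvB_main al bl := by
  -- canonical forms of the two ports
  have hA : pvA_main al bl
      = min (((al.length : Int) + (bl.length : Int))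
            - (bl.foldl (fun (p : PySem.Dict Char Int × Int) ch =>
                (p.1.insert ch (p.1.getD ch 0 + 1),
                  max p.2 ((p.1.insert ch (p.1.getD ch 0 + 1)).getD ch 0)))
              (al.foldl (fun (d : PySem.Dict Char Int) ch => d.insert ch (d.getD ch 0 + 1))
                PySem.Dict.empty, 0)).2)
          (min (pvA_grc al bl) (pvA_grc bl al)) := rfl
  have hB : pvB_main al bl
      = ((PySem.List.pyRange 0 122 1).foldl (pvBstep al bl)
          (((al.length : Int) + (bl.length : Int))
            - PySem.List.maxD ((PySem.Set.ofList (al ++ bl)).map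
                (fun ch => (al.count ch : Int) + (bl.count ch : Int))) (fun x => x) 0,
            0, 0)).1 := by
    unfold pvB_main pvBstep
    simp only [PySem.Dict.getD_foldl_insert_add_one, PySem.Dict.getD_empty, zero_add]
  rw [hA, hB]
  -- named pieces
  obtain ⟨hA1, tab, htab1, htab2, htabv⟩ := pvA_grc_spec al bl
  obtain ⟨hB1, tba, htba1, htba2, htbav⟩ := pvA_grc_spec bl al
  have hmf := pvA_maxfold bl
    (al.foldl (fun (d : PySem.Dict Char Int) ch => d.insert ch (d.getD ch 0 + 1))
      PySem.Dict.empty) 0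
  simp only [PySem.Dict.getD_foldl_insert_add_one, PySem.Dict.getD_empty, zero_add] at hmf
  obtain ⟨hm0, hmle, hmeq⟩ := hmf
  obtain ⟨hM0, hMle, hMeq⟩ := pvB_maxD al bl
  have hsw := pvB_sweep al bl 122 0
    (((al.length : Int) + (bl.length : Int))
      - PySem.List.maxD ((PySem.Set.ofList (al ++ bl)).map
          (fun ch => (al.count ch : Int) + (bl.count ch : Int))) (fun x => x) 0) (by omega)
  rw [pvCntLt_zero al, pvCntLt_zero bl] at hsw
  norm_num at hsw
  obtain ⟨hs1, hs2, hs3⟩ := hsw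
  -- abbreviations (plain lets would hide atoms from omega; use generalize)
  set mA := (bl.foldl (fun (p : PySem.Dict Char Int × Int) ch =>
      (p.1.insert ch (p.1.getD ch 0 + 1),
        max p.2 ((p.1.insert ch (p.1.getD ch 0 + 1)).getD ch 0)))
    (al.foldl (fun (d : PySem.Dict Char Int) ch => d.insert ch (d.getD ch 0 + 1))
      PySem.Dict.empty, 0)).2 with hmA
  set mB := PySem.List.maxD ((PySem.Set.ofList (al ++ bl)).map
      (fun ch => (al.count ch : Int) + (bl.count ch : Int))) (fun x => x) 0 with hmB
  set gab := pvA_grc al bl with hgab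
  set gba := pvA_grc bl al with hgba
  set r := ((PySem.List.pyRange 0 122 1).foldl (pvBstep al bl)
      (((al.length : Int) + (bl.length : Int)) - mB, 0, 0)).1 with hr
  set tot := ((al.length : Int) + (bl.length : Int)) with htot
  -- F1: A's max over b's characters is at most the true max
  have hF1 : mA ≤ mB := by
    rcases hmeq with h0 | ⟨ch, hch, hval⟩
    · omega
    · have := hMle ch (List.mem_append_right al hch)
      omega
  -- key: either the true max is already A's, or some ordering cost beats tot - mB
  have hkey : min gab gba ≤ tot - mB ∨ mB ≤ mA := by
    rcases hMeq with h0 | ⟨x, hx, hxval⟩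
    · right; omega
    · by_cases hxb : x ∈ bl
      · right
        have := hmle x hxb
        omega
      · have hcnt0 : bl.count x = 0 := List.count_eq_zero.2 hxb
        have hxa : x ∈ al := by
          rcases List.mem_append.1 hx with h | h
          · exact h
          · exact absurd h hxb
        obtain ⟨t, ht1, ht2, hor⟩ := pvF2 al bl x
        left
        rcases hor with hle | hle
        · have := hA1 t ht1 ht2
          have h1 := min_le_left gab gba
          omega
        · have := hB1 t ht1 ht2
          have h1 := min_le_right gab gba
          omega
  apply le_antisymm
  · -- A ≤ r
    rcases hs3 with hrv | ⟨t, ht1, ht3, hval⟩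
    · rcases hkey with hk | hk
      · have h1 := min_le_right (tot - mA) (min gab gba)
        omega
      · have h1 := min_le_left (tot - mA) (min gab gba)
        omega
    · rcases hval with hval | hval
      · have h1 := min_le_right (tot - mA) (min gab gba)
        have h2 := min_le_left gab gba
        have h3 := hA1 t ht1 ht3
        omega
      · have h1 := min_le_right (tot - mA) (min gab gba)
        have h2 := min_le_right gab gba
        have h3 := hB1 t ht1 ht3
        omega
  · -- r ≤ A
    have h1 : r ≤ tot - mA := by omega
    have h2 : r ≤ gab := by
      have := (hs2 tab htab1 htab2).1
      omega
    have h3 : r ≤ gba := by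
      have := (hs2 tba htba1 htba2).2
      omega
    exact le_min h1 (le_min h2 h3)

-- ===== VERDICT (by name: the statement is the Claim_ definition above) =====
theorem minCharacters_spec : Claim_equal_minCharacters := by
  intro a b _
  show minCharacters a b = minCharacters_alt a b
  exact pvMain_eq a.toList b.toList
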